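-- pv_equiv track=rewrite | github.com/pypi-data/pypi-mirror-357 | packages/stpstone/stpstone-2.0.29-py3-none-any.whl/stpstone/utils/parsers/lists.py | cartesian_product
-- ===== SOURCE A (Python) =====
-- from itertools import chain, tee, product
--
-- def cartesian_product(list_lists, int_break_n_n=None):
--     """
--     DOCSTRING:
--     INPUTS:
--     OUTPUTS:
--     """
--     # setting variables
--     list_export = list()
--     # list of cartesian product of lists
--     list_cartesian_product = list(product(*list_lists))
--     # iterating through cartesian products of lists, if break in max values for tuples is different
--     #   from none
--     if int_break_n_n != None:
--         for tup in list_cartesian_product: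
--             if (tup[:int_break_n_n] not in list_export) and (all([tup[:int_break_n_n][i] != tup[
--                     :int_break_n_n][i - 1] for i in range(1, len(tup[:int_break_n_n]))])):
--                 list_export.append(tup[:int_break_n_n])
--         return list_export
--     else:
--         return list_cartesian_product
-- ===== SOURCE B (Python) =====
-- from itertools import product
--
-- def cartesian_product(list_lists, int_break_n_n=None):
--     if int_break_n_n is None:
--         return list(product(*list_lists))
--     # any empty factor makes the full product (over ALL lists) empty
--     if any(len(l) == 0 for l in list_lists):
--         return []
--     n = len(list_lists)
--     k = int_break_n_n + n if int_break_n_n < 0 else int_break_n_n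
--     k = max(0, min(k, n))
--     list_export = []
--     seen = set()
--     for tup in product(*list_lists[:k]):
--         if tup not in seen and all(tup[i] != tup[i - 1] for i in range(1, len(tup))):
--             seen.add(tup)
--             list_export.append(tup)
--     return list_export
-- ===== Notes on version B (the rewrite author's own statement) =====
-- stated objective: alternative
-- what changed: Instead of materialising the full cartesian product and truncating every tuple to its first part, B (after an empty-factor guard, since any empty list makes A's full product empty) enumerates the product of only the leading k lists and dedups with a hash set rather than a linear 'not in list' scan.
import Mathlib
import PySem

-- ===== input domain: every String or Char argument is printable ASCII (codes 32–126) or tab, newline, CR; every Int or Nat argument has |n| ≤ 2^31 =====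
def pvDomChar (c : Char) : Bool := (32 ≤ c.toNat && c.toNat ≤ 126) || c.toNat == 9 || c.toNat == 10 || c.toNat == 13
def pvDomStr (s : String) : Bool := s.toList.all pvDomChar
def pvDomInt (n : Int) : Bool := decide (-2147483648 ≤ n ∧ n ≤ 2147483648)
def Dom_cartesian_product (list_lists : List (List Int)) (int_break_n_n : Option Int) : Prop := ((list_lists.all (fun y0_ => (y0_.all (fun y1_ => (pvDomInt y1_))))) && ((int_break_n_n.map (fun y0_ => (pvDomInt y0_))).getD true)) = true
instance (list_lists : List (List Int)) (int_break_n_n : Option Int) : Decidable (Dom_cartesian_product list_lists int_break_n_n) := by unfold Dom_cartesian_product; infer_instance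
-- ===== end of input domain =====

-- B builds the product of only the leading k lists (after an empty-factor guard) and dedups with a
-- set instead of scanning the export list, replacing A's full-product-then-truncate loop.

-- itertools.product(*ls): leftmost factor varies slowest (shared: both Pythons call it)
def pyProduct (ls : List (List Int)) : List (List Int) :=
  match ls with
  | [] => [[]]
  | l :: rest => l.flatMap (fun x => (pyProduct rest).map (fun t => x :: t))

-- all(p[i] != p[i-1] for i in range(1, len(p))) — identical expression in both Pythons
def adjOK (p : List Int) : Bool :=
  (PySem.List.pyRange 1 (p.length : Int) 1).all
    (fun i => !(PySem.List.pyGet? p i == PySem.List.pyGet? p (i - 1)))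

-- ===== PORT A =====
def cartesian_product (list_lists : List (List Int)) (int_break_n_n : Option Int) : List (List Int) :=
  let list_cartesian_product := pyProduct list_lists
  match int_break_n_n with
  | some n =>
      list_cartesian_product.foldl
        (fun list_export tup =>
          let pre := PySem.List.slice tup none (some n)
          if !(list_export.contains pre) && adjOK pre then list_export ++ [pre] else list_export)
        []
  | none => list_cartesian_product

-- ===== PORT B =====
def cartesian_product_alt (list_lists : List (List Int)) (int_break_n_n : Option Int) : List (List Int) :=
  match int_break_n_n with
  | none => pyProduct list_lists
  | some n =>
      if list_lists.any (fun l => l.length == 0) then []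
      else
        let len : Int := list_lists.length
        let k : Int := max 0 (min (if n < 0 then n + len else n) len)
        (((pyProduct (list_lists.take k.toNat)).foldl
            (fun (st : List (List Int) × PySem.Set (List Int)) tup =>
              if !(PySem.Set.contains st.2 tup) && adjOK tup
              then (st.1 ++ [tup], PySem.Set.add st.2 tup) else st)
            ([], PySem.Set.empty))).1

-- ===== PRECONDITION & SPEC =====
def Spec_cartesian_product (list_lists : List (List Int)) (int_break_n_n : Option Int) (out : List (List Int)) : Prop := out = cartesian_product_alt list_lists int_break_n_n
instance (list_lists : List (List Int)) (int_break_n_n : Option Int) (out : List (List Int)) : Decidable (Spec_cartesian_product list_lists int_break_n_n out) := by unfold Spec_cartesian_product; infer_instance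

-- ===== CLAIM (what is proved, stated in full; the proofs are below) =====
def Claim_equal_cartesian_product : Prop := ∀ (list_lists : List (List Int)) (int_break_n_n : Option Int), Dom_cartesian_product list_lists int_break_n_n → Spec_cartesian_product list_lists int_break_n_n (cartesian_product list_lists int_break_n_n)

-- ===== LEMMAS AND PROOFS =====

-- A's loop step, on the already-truncated prefix
def pvStep (e : List (List Int)) (p : List Int) : List (List Int) :=
  if !(e.contains p) && adjOK p then e ++ [p] else e

lemma pvStep_idem (e : List (List Int)) (p : List Int) : pvStep (pvStep e p) p = pvStep e p := by
  unfold pvStep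
  by_cases hc : p ∈ e
  · simp [hc]
  · by_cases ha : adjOK p
    · simp [hc, ha]
    · simp [hc, ha]

lemma pyProduct_len {ls : List (List Int)} {t : List Int} (h : t ∈ pyProduct ls) :
    t.length = ls.length := by
  induction ls generalizing t with
  | nil => simp [pyProduct] at h; simp [h]
  | cons l rest ih =>
    simp only [pyProduct, List.mem_flatMap, List.mem_map] at h
    obtain ⟨x, _, t', ht', rfl⟩ := h
    simp [ih ht']

lemma pyProduct_eq_nil_iff (ls : List (List Int)) :
    pyProduct ls = [] ↔ ∃ l ∈ ls, l = [] := by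
  induction ls with
  | nil => simp [pyProduct]
  | cons l rest ih =>
    simp only [pyProduct, List.flatMap_eq_nil_iff, List.map_eq_nil_iff]
    constructor
    · intro h
      cases l with
      | nil => exact ⟨[], by simp⟩
      | cons x xs =>
        obtain ⟨m, hm, hmnil⟩ := ih.mp (h x (by simp))
        exact ⟨m, by simp [hm], hmnil⟩
    · rintro ⟨m, hm, rfl⟩
      rcases List.mem_cons.mp hm with h | h
      · intro x hx; rw [← h] at hx; cases hx
      · intro x _; exact ih.mpr ⟨[], h, rfl⟩

lemma pyProduct_split (ls : List (List Int)) (k : Nat) :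
    pyProduct ls =
      (pyProduct (ls.take k)).flatMap
        (fun p => (pyProduct (ls.drop k)).map (fun s => p ++ s)) := by
  induction ls generalizing k with
  | nil => simp [pyProduct]
  | cons l rest ih =>
    cases k with
    | zero => simp [pyProduct]
    | succ k =>
      simp only [List.take_succ_cons, List.drop_succ_cons, pyProduct]
      rw [ih k]
      simp [List.flatMap_map, List.map_flatMap, List.map_map, Function.comp_def, List.flatMap_assoc]

lemma foldl_const_step (ss : List (List Int)) (hss : ss ≠ []) (p : List Int)
    (e : List (List Int)) :
    ss.foldl (fun e _ => pvStep e p) e = pvStep e p := by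
  induction ss generalizing e with
  | nil => exact absurd rfl hss
  | cons s ss ih =>
    cases ss with
    | nil => rfl
    | cons s' ss' =>
      rw [List.foldl_cons, ih (by simp) (pvStep e p), pvStep_idem]

lemma foldl_group (ps ss : List (List Int)) (hss : ss ≠ [])
    (f : List Int → List Int) (hf : ∀ p ∈ ps, ∀ s ∈ ss, f (p ++ s) = p)
    (e : List (List Int)) :
    (ps.flatMap (fun p => ss.map (fun s => p ++ s))).foldl
        (fun e t => pvStep e (f t)) e
      = ps.foldl pvStep e := by
  induction ps generalizing e with
  | nil => rfl
  | cons p ps ih =>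
    simp only [List.flatMap_cons, List.foldl_append, List.foldl_cons]
    rw [List.foldl_map]
    have h1 : ss.foldl (fun e s => pvStep e (f (p ++ s))) e
        = ss.foldl (fun e _ => pvStep e p) e := by
      apply PySem.List.foldl_congr_mem
      intro acc s hs
      rw [hf p (by simp) s hs]
    rw [h1, foldl_const_step ss hss p e,
        ih (fun q hq s hs => hf q (by simp [hq]) s hs)]

lemma pair_fold (ts : List (List Int)) (e : List (List Int)) :
    ts.foldl
        (fun (st : List (List Int) × PySem.Set (List Int)) tup =>
          if !(PySem.Set.contains st.2 tup) && adjOK tup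
          then (st.1 ++ [tup], PySem.Set.add st.2 tup) else st)
        (e, e)
      = (ts.foldl pvStep e, ts.foldl pvStep e) := by
  induction ts generalizing e with
  | nil => rfl
  | cons t ts ih =>
    have key : (if !(PySem.Set.contains (e : PySem.Set (List Int)) t) && adjOK t
        then (e ++ [t], PySem.Set.add e t) else ((e : List (List Int)), (e : PySem.Set (List Int))))
        = (pvStep e t, pvStep e t) := by
      unfold pvStep PySem.Set.add PySem.Set.contains
      by_cases hm : t ∈ e
      · simp [hm]
      · by_cases ha : adjOK t
        · simp [hm, ha]
        · simp [hm, ha]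
    rw [List.foldl_cons, key, ih (pvStep e t), List.foldl_cons]

lemma slice_eq_take (t : List Int) (n : Int) (len : Nat) (hlen : t.length = len) :
    PySem.List.slice t none (some n)
      = t.take (max 0 (min (if n < 0 then n + (len : Int) else n) (len : Int))).toNat := by
  by_cases hn : n < 0
  · simp only [if_pos hn]
    have hm : 0 < (-n).toNat := by omega
    have hneq : n = -(((-n).toNat : Nat) : Int) := by omega
    rw [hneq, PySem.List.slice_to_neg_natCast t (-n).toNat hm, hlen]
    congr 1
    omega
  · simp only [if_neg hn]
    rw [PySem.List.slice_to t (by omega)]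
    rcases Nat.le_total len n.toNat with h | h
    · rw [List.take_of_length_le (by omega), List.take_of_length_le (by omega)]
    · congr 1
      omega

-- ===== VERDICT (by name: the statement is the Claim_ definition above) =====
theorem cartesian_product_spec : Claim_equal_cartesian_product := by
  intro ls nb _
  unfold Spec_cartesian_product cartesian_product cartesian_product_alt
  cases nb with
  | none => rfl
  | some n =>
    simp only
    by_cases hemp : ls.any (fun l => l.length == 0)
    · rw [if_pos hemp]
      have hnil : pyProduct ls = [] := by
        rw [pyProduct_eq_nil_iff]
        simp only [List.any_eq_true, beq_iff_eq, List.length_eq_zero_iff] at hemp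
        exact hemp
      rw [hnil]
      rfl
    · rw [if_neg hemp]
      set k : Int := max 0 (min (if n < 0 then n + (ls.length : Int) else n) (ls.length : Int)) with hk
      have hkle : k.toNat ≤ ls.length := by omega
      have hss : pyProduct (ls.drop k.toNat) ≠ [] := by
        rw [ne_eq, pyProduct_eq_nil_iff]
        rintro ⟨l, hl, rfl⟩
        simp only [List.any_eq_true, beq_iff_eq, List.length_eq_zero_iff] at hemp
        exact hemp ⟨[], List.mem_of_mem_drop hl, rfl⟩
      have hA : (pyProduct ls).foldl
          (fun e tup => pvStep e (PySem.List.slice tup none (some n))) []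
          = (pyProduct (ls.take k.toNat)).foldl pvStep [] := by
        have h1 : (pyProduct ls).foldl
            (fun e tup => pvStep e (PySem.List.slice tup none (some n))) []
            = (pyProduct ls).foldl (fun e tup => pvStep e (tup.take k.toNat)) [] := by
          apply PySem.List.foldl_congr_mem
          intro acc t ht
          rw [slice_eq_take t n ls.length (pyProduct_len ht), hk]
        rw [h1, pyProduct_split ls k.toNat]
        apply foldl_group _ _ hss
        intro p hp s _
        have hplen : p.length = k.toNat := by
          rw [pyProduct_len hp, List.length_take]
          omega
        rw [← hplen, List.take_left]
      calc (pyProduct ls).foldl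
              (fun list_export tup =>
                let pre := PySem.List.slice tup none (some n)
                if !(list_export.contains pre) && adjOK pre then list_export ++ [pre]
                else list_export) []
          = (pyProduct ls).foldl
              (fun e tup => pvStep e (PySem.List.slice tup none (some n))) [] := rfl
        _ = (pyProduct (ls.take k.toNat)).foldl pvStep [] := hA
        _ = (((pyProduct (ls.take k.toNat)).foldl
              (fun (st : List (List Int) × PySem.Set (List Int)) tup =>
                if !(PySem.Set.contains st.2 tup) && adjOK tup
                then (st.1 ++ [tup], PySem.Set.add st.2 tup) else st)
              ([], PySem.Set.empty))).1 := by
            rw [show (([], PySem.Set.empty) : List (List Int) × PySem.Set (List Int))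
                = (([] : List (List Int)), (([] : List (List Int)) : PySem.Set (List Int))) from rfl,
              pair_fold]
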